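-- pv_equiv track=rewrite | github.com/ducsiukap/Python_codeptit | ICPC0114.py | checkRev
-- ===== SOURCE A (Python) =====
-- def isPrime(n)->bool:
--     i = 2
--     while i * i <= n:
--         if (n % i) == 0:
--             return False
--         i += 1
--     return True
--
-- def checkRev(n)->bool:
--     res = 0
--     while n > 0:
--         x = n % 10
--         if (x != 2) and (x != 3) and (x != 5) and (x != 7):
--             return False
--         res = res * 10 + x
--         n //= 10
--     return isPrime(res)
-- ===== SOURCE B (Python) =====
-- def isPrime(n)->bool:
--     i = 2
--     while i * i <= n:
--         if n % i == 0:
--             return False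
--         i += 1
--     return True
--
-- def checkRev(n)->bool:
--     s = str(n)
--     if set(s) <= set("2357"):
--         return isPrime(sum(int(c) * 10**i for i, c in enumerate(s)))
--     return False
-- ===== Notes on version B (the rewrite author's own statement) =====
-- stated objective: idiomatic
-- what changed: B works on the decimal string of n: it validates all digits at once by set inclusion in "2357" and obtains the reversed value as a place-value sum over enumerate(s), replacing A's arithmetic loop that extracts digits with modulus and floor division and interleaves validation with reversed accumulation; isPrime stays trial division.
-- intended difference: On nonpositive n (n <= 0) A's digit loop is vacuous and it returns isPrime(0)=True by accident; B returns False because str(n) is not made solely of prime digits, the intended answer for a number whose digits are not all prime. — e.g. on checkRev(0): A returns true, B returns false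
import Mathlib
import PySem

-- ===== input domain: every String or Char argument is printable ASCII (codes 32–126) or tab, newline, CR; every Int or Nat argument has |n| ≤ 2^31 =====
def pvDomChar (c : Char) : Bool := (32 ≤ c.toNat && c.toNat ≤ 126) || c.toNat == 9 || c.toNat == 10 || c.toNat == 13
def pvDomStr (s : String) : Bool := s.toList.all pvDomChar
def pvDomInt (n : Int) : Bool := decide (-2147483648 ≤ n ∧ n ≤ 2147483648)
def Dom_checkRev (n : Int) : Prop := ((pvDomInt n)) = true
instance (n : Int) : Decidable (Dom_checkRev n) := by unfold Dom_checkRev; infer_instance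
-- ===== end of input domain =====

-- B validates the digits on the decimal string of n (set inclusion in "2357") and obtains the
-- reversed value as a place-value sum over enumerate(s), replacing A's arithmetic
-- digit-extraction loop (objective: idiomatic; same cost). On nonpositive n the values differ
-- by design — see D_checkRev.

-- ===== PORT A =====
-- shared helper: both Pythons define the identical isPrime trial-division loop.
-- Structural recursion on a fuel argument; fuel n.toNat + 1 never runs out:
-- while i*i <= n holds, i <= n, so enough fuel always remains.
def isPrimeLoop : Nat → Int → Int → Bool
  | 0, _, _ => true            -- unreachable from isPrime's initial fuel
  | fuel + 1, n, i =>
    if i * i ≤ n then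
      if PySem.Int.mod n i == 0 then false
      else isPrimeLoop fuel n (i + 1)
    else true

def isPrime (n : Int) : Bool := isPrimeLoop (n.toNat + 1) n 2

-- while n > 0: x = n % 10; reject non-prime digit; res = res*10 + x; n //= 10
-- fuel n.toNat suffices: while n > 0, n // 10 < n, so n.toNat strictly decreases
def checkRevLoop : Nat → Int → Int → Bool
  | 0, _, res => isPrime res   -- reached only with n ≤ 0, where the loop body is skipped
  | fuel + 1, n, res =>
    if n > 0 then
      let x := PySem.Int.mod n 10
      if x ≠ 2 ∧ x ≠ 3 ∧ x ≠ 5 ∧ x ≠ 7 then false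
      else checkRevLoop fuel (PySem.Int.floordiv n 10) (res * 10 + x)
    else isPrime res

def checkRev (n : Int) : Bool := checkRevLoop n.toNat n 0

-- ===== PORT B =====
def checkRev_alt (n : Int) : Bool :=
  let cs := PySem.Int.toChars n                       -- s = str(n)
  if PySem.Set.issubset (PySem.Set.ofList cs) (PySem.Set.ofList ['2', '3', '5', '7']) then
    -- sum(int(c) * 10**i for i, c in enumerate(s)); the branch guarantees every c is a
    -- digit of "2357", so int(c) never raises and the .getD 0 default is unreachable
    isPrime (((PySem.List.enumerate cs 0).map
      (fun ic => (PySem.Int.ofChars? [ic.2]).getD 0 * 10 ^ ic.1.toNat)).sum)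
  else false

-- ===== PRECONDITION & SPEC =====
-- On nonpositive n A's digit loop is vacuous and A returns isPrime(0)=True, an accidental
-- value; B returns False because str(n) ('0' or a '-'-led string) is not made of prime
-- digits, which is the intended answer for a number whose digits are not all prime.
def D_checkRev (n : Int) : Prop := n ≤ 0
instance (n : Int) : Decidable (D_checkRev n) := by unfold D_checkRev; infer_instance

def Spec_checkRev (n : Int) (out : Bool) : Prop := ¬ D_checkRev n → out = checkRev_alt n
instance (n : Int) (out : Bool) : Decidable (Spec_checkRev n out) := by unfold Spec_checkRev; infer_instance

def pvDiffWitness_checkRev : Int := 0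
def pvDiffWitnessOut_checkRev : Bool × Bool := (true, false)

-- ===== CLAIM =====
def Claim_unchanged_checkRev : Prop := ∀ (n : Int), Dom_checkRev n → Spec_checkRev n (checkRev n)
def Claim_changed_checkRev : Prop := Dom_checkRev (pvDiffWitness_checkRev) ∧ D_checkRev (pvDiffWitness_checkRev) ∧ checkRev (pvDiffWitness_checkRev) = pvDiffWitnessOut_checkRev.1 ∧ checkRev_alt (pvDiffWitness_checkRev) = pvDiffWitnessOut_checkRev.2 ∧ pvDiffWitnessOut_checkRev.1 ≠ pvDiffWitnessOut_checkRev.2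
def Claim_exact_checkRev : Prop := ∀ (n : Int), Dom_checkRev n → D_checkRev n → checkRev n ≠ checkRev_alt n

-- ===== LEMMAS AND PROOFS =====

-- base-10 digits of m, least significant first (proof-side model)
def digitsLSB (m : Nat) : List Nat :=
  if _h : m = 0 then [] else (m % 10) :: digitsLSB (m / 10)
decreasing_by exact Nat.div_lt_self (by omega) (by omega)

def goodDigit (d : Nat) : Bool := d == 2 || d == 3 || d == 5 || d == 7

-- place value of an LSB-first digit list
def placeVal : List Nat → Int
  | [] => 0
  | d :: t => (d : Int) * 10 ^ t.length + placeVal t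

lemma digitsLSB_lt_ten : ∀ m, ∀ d ∈ digitsLSB m, d < 10 := by
  intro m
  induction m using Nat.strong_induction_on with
  | _ m ih =>
    rw [digitsLSB]
    split
    · simp
    · intro d hd
      rcases List.mem_cons.mp hd with h | h
      · omega
      · exact ih (m / 10) (Nat.div_lt_self (by omega) (by omega)) d h

-- A's loop, characterised by the digit list of its argument (fuel ≥ the digit count)
lemma checkRevLoop_eq : ∀ fuel (m : Nat), m ≤ fuel → ∀ res : Int,
    checkRevLoop fuel (m : Int) res =
      if (digitsLSB m).all goodDigit
      then isPrime ((digitsLSB m).foldl (fun (a : Int) (d : Nat) => a * 10 + (d : Int)) res)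
      else false := by
  intro fuel
  induction fuel with
  | zero =>
    intro m hm res
    have : m = 0 := by omega
    subst this
    rw [digitsLSB]
    simp [checkRevLoop]
  | succ f ihf =>
    intro m hm res
    by_cases h0 : m = 0
    · subst h0
      rw [digitsLSB]
      simp [checkRevLoop]
    · have hpos : (0 : Int) < (m : Int) := by exact_mod_cast Nat.pos_of_ne_zero h0
      rw [digitsLSB, dif_neg h0]
      show (if (m : Int) > 0 then _ else _) = _
      rw [if_pos hpos]
      have hmod : PySem.Int.mod (m : Int) 10 = ((m % 10 : Nat) : Int) := by
        exact_mod_cast PySem.Int.mod_natCast m 10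
      have hdiv : PySem.Int.floordiv (m : Int) 10 = ((m / 10 : Nat) : Int) := by
        exact_mod_cast PySem.Int.floordiv_natCast m 10
      simp only [hmod, hdiv]
      have hlt : m / 10 < m := Nat.div_lt_self (by omega) (by omega)
      by_cases hg : goodDigit (m % 10) = true
      · have hne : ¬(((m % 10 : Nat) : Int) ≠ 2 ∧ ((m % 10 : Nat) : Int) ≠ 3 ∧
            ((m % 10 : Nat) : Int) ≠ 5 ∧ ((m % 10 : Nat) : Int) ≠ 7) := by
          simp only [goodDigit, Bool.or_eq_true, beq_iff_eq] at hg
          omega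
        rw [if_neg hne, ihf (m / 10) (by omega)]
        simp [List.all_cons, List.foldl_cons, hg]
      · have hne : (((m % 10 : Nat) : Int) ≠ 2 ∧ ((m % 10 : Nat) : Int) ≠ 3 ∧
            ((m % 10 : Nat) : Int) ≠ 5 ∧ ((m % 10 : Nat) : Int) ≠ 7) := by
          simp only [goodDigit, Bool.or_eq_true, beq_iff_eq] at hg
          push_neg at hg
          omega
        rw [if_pos hne]
        simp [List.all_cons, Bool.eq_false_iff.mpr hg]

-- core's fuel-based printer produces exactly the reversed LSB-first digit list
lemma toDigitsCore_eq : ∀ fuel m, ∀ l : List Char, 0 < m → m ≤ fuel →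
    Nat.toDigitsCore 10 fuel m l = ((digitsLSB m).map Nat.digitChar).reverse ++ l := by
  intro fuel
  induction fuel with
  | zero => intro m l h1 h2; omega
  | succ f ihf =>
    intro m l h1 h2
    simp only [Nat.toDigitsCore]
    by_cases hq : m / 10 = 0
    · rw [if_pos hq, digitsLSB, dif_neg (by omega : ¬ m = 0), digitsLSB]
      simp [hq]
    · have hlt : m / 10 < m := Nat.div_lt_self (by omega) (by omega)
      rw [if_neg hq, ihf (m / 10) _ (Nat.pos_of_ne_zero hq) (by omega)]
      conv_rhs => rw [digitsLSB]
      rw [dif_neg (by omega : ¬ m = 0)]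
      simp

lemma toDigits_eq (m : Nat) (hm : 0 < m) :
    Nat.toDigits 10 m = ((digitsLSB m).map Nat.digitChar).reverse := by
  rw [Nat.toDigits, toDigitsCore_eq (m + 1) m [] hm (by omega)]
  simp

lemma digitChar_mem (d : Nat) (hd : d < 10) :
    (Nat.digitChar d ∈ ['2', '3', '5', '7']) ↔ goodDigit d = true := by
  interval_cases d <;> decide

-- int(c) on the single digit character of d is d back again
lemma intOf_digitChar (d : Nat) (hd : d < 10) :
    (PySem.Int.ofChars? [Nat.digitChar d]).getD 0 = (d : Int) := by
  interval_cases d <;> decide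

-- A's accumulator fold equals the place-value sum
lemma foldl_eq_placeVal : ∀ ds : List Nat, ∀ a : Int,
    ds.foldl (fun (a : Int) (d : Nat) => a * 10 + (d : Int)) a = a * 10 ^ ds.length + placeVal ds := by
  intro ds
  induction ds with
  | nil => intro a; simp [placeVal]
  | cons d t ih =>
    intro a
    rw [List.foldl_cons, ih]
    simp only [placeVal, List.length_cons]
    ring

-- B's enumerate sum over the MSB-first characters equals the same place-value sum
lemma sum_eq_placeVal : ∀ ds : List Nat, (∀ d ∈ ds, d < 10) →
    (((PySem.List.enumerate ((ds.map Nat.digitChar).reverse) 0).map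
      (fun ic => (PySem.Int.ofChars? [ic.2]).getD 0 * 10 ^ ic.1.toNat)).sum) = placeVal ds := by
  intro ds
  induction ds with
  | nil => intro _; simp [PySem.List.enumerate_nil, placeVal]
  | cons d t ih =>
    intro hds
    have hrev : ((d :: t).map Nat.digitChar).reverse
        = (t.map Nat.digitChar).reverse ++ [Nat.digitChar d] := by simp
    rw [hrev, PySem.List.enumerate_append, List.map_append, List.sum_append,
      ih (fun x hx => hds x (List.mem_cons_of_mem d hx))]
    have hlen : ((t.map Nat.digitChar).reverse).length = t.length := by simp
    simp only [hlen, PySem.List.enumerate_cons, PySem.List.enumerate_nil, List.map_cons,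
      List.map_nil, List.sum_cons, List.sum_nil,
      intOf_digitChar d (hds d (List.mem_cons_self))]
    simp only [placeVal, zero_add, Int.toNat_natCast]
    ring

-- ===== VERDICT (by name: the statements are the Claim_ definitions above) =====
theorem checkRev_spec : Claim_unchanged_checkRev := by
  intro n _
  unfold Spec_checkRev checkRev checkRev_alt
  intro hD
  unfold D_checkRev at hD
  push_neg at hD
  obtain ⟨m, rfl⟩ : ∃ m : Nat, n = (m : Int) :=
    ⟨n.toNat, (Int.toNat_of_nonneg (by omega)).symm⟩
  have hm : 0 < m := by exact_mod_cast hD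
  have hcs : PySem.Int.toChars (m : Int) = ((digitsLSB m).map Nat.digitChar).reverse := by
    rw [PySem.Int.toChars, if_neg (by omega : ¬ (m : Int) < 0)]
    simp [toDigits_eq m hm]
  have hds := digitsLSB_lt_ten m
  rw [show ((m : Int)).toNat = m from Int.toNat_natCast m, checkRevLoop_eq m m le_rfl 0]
  simp only [hcs]
  by_cases hall : (digitsLSB m).all goodDigit = true
  · have hsub : PySem.Set.issubset
        (PySem.Set.ofList (((digitsLSB m).map Nat.digitChar).reverse))
        (PySem.Set.ofList ['2', '3', '5', '7']) = true := by
      rw [PySem.Set.issubset_iff]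
      intro x hx
      rw [PySem.Set.mem_ofList] at hx ⊢
      simp only [List.mem_reverse, List.mem_map] at hx
      obtain ⟨d, hd, rfl⟩ := hx
      exact (digitChar_mem d (hds d hd)).mpr (List.all_eq_true.mp hall d hd)
    rw [if_pos hall, hsub]
    simp only [if_true]
    rw [sum_eq_placeVal (digitsLSB m) hds, foldl_eq_placeVal]
    norm_num
  · have hsub : PySem.Set.issubset
        (PySem.Set.ofList (((digitsLSB m).map Nat.digitChar).reverse))
        (PySem.Set.ofList ['2', '3', '5', '7']) = false := by
      obtain ⟨d, hd, hdbad⟩ : ∃ d ∈ digitsLSB m, ¬ goodDigit d = true := by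
        by_contra hcon
        push_neg at hcon
        exact hall (List.all_eq_true.mpr hcon)
      apply Bool.eq_false_iff.mpr
      intro hcon
      have := (PySem.Set.issubset_iff _ _).mp hcon (Nat.digitChar d) (by
        rw [PySem.Set.mem_ofList]
        simp only [List.mem_reverse, List.mem_map]
        exact ⟨d, hd, rfl⟩)
      rw [PySem.Set.mem_ofList] at this
      exact hdbad ((digitChar_mem d (hds d hd)).mp this)
    rw [if_neg hall, hsub]
    simp

theorem checkRev_changed : Claim_changed_checkRev := by
  unfold Claim_changed_checkRev; decide

theorem checkRev_tight : Claim_exact_checkRev := by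
  intro n _ hD
  unfold D_checkRev at hD
  have hA : checkRev n = true := by
    unfold checkRev
    rw [show n.toNat = 0 by omega]
    simp only [checkRevLoop]
    decide
  have hB : checkRev_alt n = false := by
    unfold checkRev_alt
    by_cases h0 : n = 0
    · subst h0; decide
    · have hneg : n < 0 := by omega
      rw [PySem.Int.toChars, if_pos hneg]
      have hsub : PySem.Set.issubset
          (PySem.Set.ofList ('-' :: Nat.toDigits 10 n.natAbs))
          (PySem.Set.ofList ['2', '3', '5', '7']) = false := by
        apply Bool.eq_false_iff.mpr
        intro hcon
        have := (PySem.Set.issubset_iff _ _).mp hcon '-' (by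
          rw [PySem.Set.mem_ofList]; exact List.mem_cons_self)
        rw [PySem.Set.mem_ofList] at this
        simp at this
      simp only [hsub]
      simp
  rw [hA, hB]
  decide
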